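-- pv_equiv track=rewrite | github.com/harshitalpha/Algorithms | DP/dp_4.py | solve_n_2_time
-- ===== SOURCE A (Python) =====
-- def solve_n_2_time(a,n):
--     mat = [[False for i in range(n)] for j in range(n)]
--
--     count = 0
--     for i in range(n):
--         for j in range(n):
--             if i <= j:
--                 if i == j:
--                     mat[i][j] = True
--                     count = count + 1
--                 else:
--                     if(mat[j-1][i] == True):
--                         if(a[j] >= a[j-1]):
--                             mat[j][i] = True
--                             count = count + 1
--                         else:
--                             mat[j][i] = False
--                     else:
--                         mat[j][i] = False
--
--     return count
-- ===== SOURCE B (Python) =====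
-- def solve_n_2_time(a, n):
--     # One pass: run = length of longest non-decreasing run ending at i;
--     # each run ending at i contributes `run` subarrays.
--     count = 0
--     run = 0
--     for i in range(n):
--         run = run + 1 if (i > 0 and a[i] >= a[i - 1]) else 1
--         count += run
--     return count
-- ===== Notes on version B (the rewrite author's own statement) =====
-- stated objective: faster
-- what changed: Replaces A's O(n^2) boolean DP matrix (mat[j][i] = a[i..j] non-decreasing, filled by a double loop) with a single O(n) pass that tracks the length of the non-decreasing run ending at each index and sums those lengths.
import Mathlib
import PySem

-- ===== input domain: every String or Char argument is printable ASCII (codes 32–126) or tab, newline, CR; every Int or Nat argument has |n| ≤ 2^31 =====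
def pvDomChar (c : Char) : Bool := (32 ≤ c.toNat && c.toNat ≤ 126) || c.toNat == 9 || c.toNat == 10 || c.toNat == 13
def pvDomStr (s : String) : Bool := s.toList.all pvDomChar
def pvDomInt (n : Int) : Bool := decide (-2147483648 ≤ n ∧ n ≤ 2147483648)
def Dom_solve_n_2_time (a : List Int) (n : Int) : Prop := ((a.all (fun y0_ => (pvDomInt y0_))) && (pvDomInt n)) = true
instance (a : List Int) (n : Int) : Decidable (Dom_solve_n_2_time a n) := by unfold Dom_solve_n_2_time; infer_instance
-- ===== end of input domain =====

-- B replaces A's O(n^2) boolean DP matrix by a single O(n) pass summing run lengths.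

-- ===== PORT A =====
-- Python mat[j][i] read: row j, column i; indices produced by range(n) are ≥ 0,
-- so .toNat here is exact (no negative-index wraparound can occur).
def pvGet2 (mat : List (List Bool)) (j i : Int) : Bool :=
  (mat.getD j.toNat []).getD i.toNat false

def pvSet2 (mat : List (List Bool)) (j i : Int) (b : Bool) : List (List Bool) :=
  mat.set j.toNat ((mat.getD j.toNat []).set i.toNat b)

-- the body of A's inner loop, step for step (a[j] is in range under Pre_, where pyGetD is exact)
def stepA (a : List Int) (i : Int) (st : List (List Bool) × Int) (j : Int) :
    List (List Bool) × Int :=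
  if i ≤ j then
    if i = j then (pvSet2 st.1 i j true, st.2 + 1)
    else
      if pvGet2 st.1 (j - 1) i = true then
        if PySem.List.pyGetD a j 0 ≥ PySem.List.pyGetD a (j - 1) 0 then
          (pvSet2 st.1 j i true, st.2 + 1)
        else (pvSet2 st.1 j i false, st.2)
      else (pvSet2 st.1 j i false, st.2)
  else st

def solve_n_2_time (a : List Int) (n : Int) : Int :=
  let mat : List (List Bool) :=
    (PySem.List.pyRange 0 n 1).map (fun _ => (PySem.List.pyRange 0 n 1).map (fun _ => false))
  ((PySem.List.pyRange 0 n 1).foldl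
    (fun st i => (PySem.List.pyRange 0 n 1).foldl (stepA a i) st) (mat, 0)).2

-- ===== PORT B =====
-- single pass: run = length of the non-decreasing run ending at i; each i contributes run
def stepB (a : List Int) (st : Int × Int) (i : Int) : Int × Int :=
  let run : Int :=
    if 0 < i ∧ PySem.List.pyGetD a i 0 ≥ PySem.List.pyGetD a (i - 1) 0 then st.2 + 1 else 1
  (st.1 + run, run)

def solve_n_2_time_alt (a : List Int) (n : Int) : Int :=
  ((PySem.List.pyRange 0 n 1).foldl (stepB a) (0, 0)).1

-- ===== PRECONDITION & SPEC =====
-- Python A raises IndexError exactly when n ≥ 2 and n > len(a) (a[j] is read for every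
-- 1 ≤ j < n); for n ≤ 1 no element is read. B raises on exactly the same inputs.
def Pre_solve_n_2_time (a : List Int) (n : Int) : Prop := n ≤ (a.length : Int) ∨ n ≤ 1
instance (a : List Int) (n : Int) : Decidable (Pre_solve_n_2_time a n) := by
  unfold Pre_solve_n_2_time; infer_instance

def pvWitness_solve_n_2_time : List Int × Int := ([1, 3, 2, 2], 4)

def Spec_solve_n_2_time (a : List Int) (n : Int) (out : Int) : Prop := out = solve_n_2_time_alt a n
instance (a : List Int) (n : Int) (out : Int) : Decidable (Spec_solve_n_2_time a n out) := by
  unfold Spec_solve_n_2_time; infer_instance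

-- ===== CLAIM (what is proved, stated in full; the proofs are below) =====
def Claim_equal_solve_n_2_time : Prop := ∀ (a : List Int) (n : Int), Dom_solve_n_2_time a n → Pre_solve_n_2_time a n → Spec_solve_n_2_time a n (solve_n_2_time a n)

-- ===== LEMMAS AND PROOFS =====

-- G a i j : the subarray a[i..j] is non-decreasing (indices as Nat, getD as in the ports)
def G (a : List Int) (i j : ℕ) : Bool :=
  (List.range' i (j - i)).all (fun k => decide (a.getD (k + 1) 0 ≥ a.getD k 0))

-- c a i j : 1 if a[i..j] non-decreasing else 0
def cIJ (a : List Int) (i j : ℕ) : Int := if G a i j then 1 else 0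

def Dims (mat : List (List Bool)) (m : ℕ) : Prop :=
  mat.length = m ∧ ∀ r ∈ mat, r.length = m

lemma G_self (a : List Int) (i : ℕ) : G a i i = true := by
  simp [G]

lemma G_succ (a : List Int) {i j : ℕ} (h : i ≤ j) :
    G a i (j + 1) = (G a i j && decide (a.getD (j + 1) 0 ≥ a.getD j 0)) := by
  have : j + 1 - i = (j - i) + 1 := by omega
  rw [G, this, List.range'_concat]
  have : i + (j - i) = j := by omega
  simp [G, this, List.all_append]

lemma dims_set2 {mat : List (List Bool)} {m : ℕ} (h : Dims mat m)
    {j : ℕ} (hj : j < m) (i : ℕ) (b : Bool) : Dims (pvSet2 mat (↑j) (↑i) b) m := by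
  obtain ⟨hl, hr⟩ := h
  refine ⟨by simp [pvSet2, hl], ?_⟩
  intro r hrmem
  unfold pvSet2 at hrmem
  simp only [Int.toNat_natCast] at hrmem
  rcases List.mem_or_eq_of_mem_set hrmem with h1 | h2
  · exact hr r h1
  · subst h2
    rw [List.length_set]
    exact hr _ (by rw [List.getD_eq_getElem _ _ (by omega)]; exact List.getElem_mem _)

lemma get2_set2_self {mat : List (List Bool)} {m : ℕ} (h : Dims mat m)
    {j i : ℕ} (hj : j < m) (hi : i < m) (b : Bool) :
    pvGet2 (pvSet2 mat (↑j) (↑i) b) (↑j) (↑i) = b := by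
  obtain ⟨hl, hr⟩ := h
  have hj' : j < mat.length := by omega
  have hrow : (mat.getD j []).length = m := by
    rw [List.getD_eq_getElem _ _ hj']; exact hr _ (List.getElem_mem _)
  unfold pvGet2 pvSet2
  simp only [Int.toNat_natCast]
  have h1 : (mat.set j ((mat.getD j []).set i b)).getD j [] = (mat.getD j []).set i b := by
    rw [List.getD_eq_getElem _ _ (by simpa using hj'), List.getElem_set_self]
  have h2 : i < ((mat.getD j []).set i b).length := by rw [List.length_set, hrow]; exact hi
  rw [h1, List.getD_eq_getElem _ _ h2, List.getElem_set_self]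

-- A's inner loop on the indices j < i does nothing
lemma inner_skip (a : List Int) (i : ℕ) :
    ∀ (l : List ℕ), (∀ j ∈ l, j < i) → ∀ st,
      (l.map (Nat.cast : ℕ → ℤ)).foldl (stepA a (↑i)) st = st := by
  intro l
  induction l with
  | nil => intro _ st; rfl
  | cons x xs ih =>
    intro h st
    have hxi : x < i := h x (by simp)
    have hx : ¬ ((i : Int) ≤ (x : Int)) := by exact_mod_cast Nat.not_le.mpr hxi
    rw [List.map_cons, List.foldl_cons]
    rw [show stepA a (↑i) st (↑x) = st from by rw [stepA, if_neg hx]]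
    exact ih (fun j hj => h j (by simp [hj])) st

-- A's inner loop chain: processing j = p+1 .. p+t keeps column i equal to G and
-- adds one to the count for each non-decreasing a[i..j]
lemma inner_chain (a : List Int) (m i : ℕ) (hi : i < m) :
    ∀ (t p : ℕ), i ≤ p → p + t < m →
    ∀ (mat : List (List Bool)) (cnt : Int), Dims mat m →
      pvGet2 mat (↑p) (↑i) = G a i p →
      (((List.range' (p + 1) t).map (Nat.cast : ℕ → ℤ)).foldl (stepA a (↑i)) (mat, cnt)).2
          = cnt + ∑ j ∈ Finset.Ico (p + 1) (p + 1 + t), cIJ a i j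
        ∧ Dims (((List.range' (p + 1) t).map (Nat.cast : ℕ → ℤ)).foldl (stepA a (↑i)) (mat, cnt)).1 m
        ∧ pvGet2 ((((List.range' (p + 1) t).map (Nat.cast : ℕ → ℤ)).foldl (stepA a (↑i)) (mat, cnt)).1) (↑(p + t)) (↑i)
            = G a i (p + t) := by
  intro t
  induction t with
  | zero =>
    intro p hip hpt mat cnt hd hg
    refine ⟨by simp, by simpa using hd, by simpa using hg⟩
  | succ t ih =>
    intro p hip hpt mat cnt hd hg
    have hc1 : ((p + 1 : ℕ) : ℤ) - 1 = (p : ℤ) := by push_cast; ring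
    have hile : ((i : ℕ) : ℤ) ≤ ((p + 1 : ℕ) : ℤ) := by exact_mod_cast Nat.le_succ_of_le hip
    have hine : ¬ (((i : ℕ) : ℤ) = ((p + 1 : ℕ) : ℤ)) := by
      exact_mod_cast (by omega : ¬ i = p + 1)
    have hstep : stepA a (↑i) (mat, cnt) (↑(p + 1)) =
        (pvSet2 mat (↑(p + 1)) (↑i) (G a i (p + 1)), cnt + cIJ a i (p + 1)) := by
      rw [stepA, if_pos hile, if_neg hine, hc1, hg]
      rw [PySem.List.pyGetD_natCast, PySem.List.pyGetD_natCast]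
      by_cases hGp : G a i p = true
      · rw [if_pos hGp]
        by_cases hge : a.getD (p + 1) 0 ≥ a.getD p 0
        · rw [if_pos hge]
          have hge' : a[p]?.getD 0 ≤ a[p + 1]?.getD 0 := by
            simpa [List.getD_eq_getElem?_getD] using hge
          have hG1 : G a i (p + 1) = true := by
            rw [G_succ a hip]; simp [hGp, hge']
          simp [hG1, cIJ]
        · rw [if_neg hge]
          have hge' : ¬ a[p]?.getD 0 ≤ a[p + 1]?.getD 0 := by
            simpa [List.getD_eq_getElem?_getD] using hge
          have hG0 : G a i (p + 1) = false := by
            rw [G_succ a hip]; simp [hge']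
          simp [hG0, cIJ]
      · rw [if_neg hGp]
        have hGf : G a i p = false := by simpa using hGp
        have hG0 : G a i (p + 1) = false := by
          rw [G_succ a hip, hGf]; simp
        simp [hG0, cIJ]
    rw [List.range'_succ, List.map_cons, List.foldl_cons, hstep]
    obtain ⟨ih1, ih2, ih3⟩ := ih (p + 1) (by omega) (by omega)
      (pvSet2 mat (↑(p + 1)) (↑i) (G a i (p + 1))) (cnt + cIJ a i (p + 1))
      (dims_set2 hd (by omega) i _) (get2_set2_self hd (by omega) hi _)
    refine ⟨?_, ?_, ?_⟩
    · have e1 : p + 1 + 1 + t = p + 1 + (t + 1) := by omega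
      rw [e1] at ih1
      rw [ih1]
      conv_rhs => rw [Finset.sum_eq_sum_Ico_succ_bot (show p + 1 < p + 1 + (t + 1) by omega)]
      ring
    · exact ih2
    · have e2 : p + (t + 1) = p + 1 + t := by omega
      rw [e2]; exact ih3

-- one full pass of A's inner loop for a fixed outer index i
lemma inner_total (a : List Int) (m i : ℕ) (hi : i < m)
    (mat : List (List Bool)) (cnt : Int) (hd : Dims mat m) :
    (((List.range m).map (Nat.cast : ℕ → ℤ)).foldl (stepA a (↑i)) (mat, cnt)).2
        = cnt + ∑ j ∈ Finset.Ico i m, cIJ a i j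
      ∧ Dims (((List.range m).map (Nat.cast : ℕ → ℤ)).foldl (stepA a (↑i)) (mat, cnt)).1 m := by
  have hsplit : List.range m = List.range' 0 i ++ List.range' i (m - i) := by
    rw [List.range_eq_range']
    have h := @List.range'_append 0 i (m - i) 1
    simp only [Nat.zero_add, Nat.one_mul] at h
    rw [h]
    congr 1; omega
  have hmi : m - i = (m - i - 1) + 1 := by omega
  rw [hsplit, List.map_append, List.foldl_append,
    inner_skip a i _ (fun j hj => by simpa using (List.mem_range'_1.mp hj).2) (mat, cnt),
    hmi, List.range'_succ, List.map_cons, List.foldl_cons]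
  have hstep0 : stepA a (↑i) (mat, cnt) (↑i) = (pvSet2 mat (↑i) (↑i) true, cnt + 1) := by
    rw [stepA, if_pos le_rfl, if_pos rfl]
  rw [hstep0]
  obtain ⟨h1, h2, _⟩ := inner_chain a m i hi (m - i - 1) i le_rfl (by omega)
    (pvSet2 mat (↑i) (↑i) true) (cnt + 1) (dims_set2 hd hi i true)
    (by rw [get2_set2_self hd hi hi true, G_self])
  refine ⟨?_, h2⟩
  rw [h1]
  conv_rhs => rw [Finset.sum_eq_sum_Ico_succ_bot hi]
  have e : i + 1 + (m - i - 1) = m := by omega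
  rw [e, cIJ, G_self, if_pos rfl]
  ring

-- A's outer loop accumulates, per i, the number of non-decreasing subarrays starting at i
lemma outer_total (a : List Int) (m : ℕ) :
    ∀ (s : ℕ), s ≤ m → ∀ (mat : List (List Bool)) (cnt : Int), Dims mat m →
    (((List.range s).map (Nat.cast : ℕ → ℤ)).foldl
        (fun st i => ((List.range m).map (Nat.cast : ℕ → ℤ)).foldl (stepA a i) st) (mat, cnt)).2
        = cnt + ∑ i ∈ Finset.range s, ∑ j ∈ Finset.Ico i m, cIJ a i j
      ∧ Dims (((List.range s).map (Nat.cast : ℕ → ℤ)).foldl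
        (fun st i => ((List.range m).map (Nat.cast : ℕ → ℤ)).foldl (stepA a i) st) (mat, cnt)).1 m := by
  intro s
  induction s with
  | zero => intro _ mat cnt hd; exact ⟨by simp, by simpa using hd⟩
  | succ s ih =>
    intro hs mat cnt hd
    rw [List.range_succ, List.map_append, List.foldl_append, List.map_cons, List.foldl_cons,
      List.map_nil, List.foldl_nil]
    obtain ⟨ih1, ih2⟩ := ih (by omega) mat cnt hd
    set st := ((List.range s).map (Nat.cast : ℕ → ℤ)).foldl
      (fun st i => ((List.range m).map (Nat.cast : ℕ → ℤ)).foldl (stepA a i) st) (mat, cnt) with hst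
    obtain ⟨g1, g2⟩ := inner_total a m s (by omega) st.1 st.2 ih2
    constructor
    · rw [show st = (st.1, st.2) from rfl] at g1 ⊢
      rw [g1, ih1, Finset.sum_range_succ]
      ring
    · rw [show st = (st.1, st.2) from rfl] at g2 ⊢
      exact g2

-- N a j : number of non-decreasing subarrays ending at j
def N (a : List Int) (j : ℕ) : Int := ∑ i ∈ Finset.range (j + 1), cIJ a i j

lemma N_zero (a : List Int) : N a 0 = 1 := by
  rw [N, Finset.sum_range_one, cIJ, G_self, if_pos rfl]

lemma N_succ (a : List Int) (k : ℕ) :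
    N a (k + 1) = if a.getD (k + 1) 0 ≥ a.getD k 0 then N a k + 1 else 1 := by
  rw [N, Finset.sum_range_succ]
  have hkk : cIJ a (k + 1) (k + 1) = 1 := by rw [cIJ, G_self, if_pos rfl]
  by_cases hge : a.getD (k + 1) 0 ≥ a.getD k 0
  · rw [if_pos hge, hkk, N]
    congr 1
    apply Finset.sum_congr rfl
    intro i hi
    have hik : i ≤ k := by simpa [Nat.lt_succ_iff] using hi
    have hge' : a[k]?.getD 0 ≤ a[k + 1]?.getD 0 := by
      simpa [List.getD_eq_getElem?_getD] using hge
    rw [cIJ, cIJ, G_succ a hik]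
    simp [hge']
  · rw [if_neg hge, hkk]
    have hz : ∀ i ∈ Finset.range (k + 1), cIJ a i (k + 1) = 0 := by
      intro i hi
      have hik : i ≤ k := by simpa [Nat.lt_succ_iff] using hi
      have hge' : ¬ a[k]?.getD 0 ≤ a[k + 1]?.getD 0 := by
        simpa [List.getD_eq_getElem?_getD] using hge
      rw [cIJ, G_succ a hik]
      simp [hge']
    rw [Finset.sum_congr rfl hz]
    simp

-- B's single pass: after k steps the state is (∑_{j<k} N j, N (k-1))
lemma b_loop (a : List Int) :
    ∀ (k : ℕ),
    ((List.range k).map (Nat.cast : ℕ → ℤ)).foldl (stepB a) (0, 0)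
      = (∑ j ∈ Finset.range k, N a j, if k = 0 then 0 else N a (k - 1)) := by
  intro k
  induction k with
  | zero => simp
  | succ k ih =>
    rw [List.range_succ, List.map_append, List.foldl_append, List.map_cons, List.foldl_cons,
      List.map_nil, List.foldl_nil, ih]
    rw [stepB]
    rcases Nat.eq_zero_or_pos k with hk | hk
    · subst hk
      have hcond : ¬ (0 < ((0 : ℕ) : ℤ) ∧
          PySem.List.pyGetD a ((0 : ℕ) : ℤ) 0 ≥ PySem.List.pyGetD a (((0 : ℕ) : ℤ) - 1) 0) := by
        simp
      rw [if_neg hcond]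
      simp [N_zero]
    · have hk1 : k = (k - 1) + 1 := by omega
      have hcast : ((k : ℕ) : ℤ) - 1 = ((k - 1 : ℕ) : ℤ) := by omega
      have hcond : (0 < ((k : ℕ) : ℤ) ∧
          PySem.List.pyGetD a ((k : ℕ) : ℤ) 0 ≥ PySem.List.pyGetD a (((k : ℕ) : ℤ) - 1) 0)
          ↔ a.getD k 0 ≥ a.getD (k - 1) 0 := by
        rw [hcast, PySem.List.pyGetD_natCast, PySem.List.pyGetD_natCast]
        constructor
        · exact fun h => h.2
        · exact fun h => ⟨by exact_mod_cast hk, h⟩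
      have hrun : (if 0 < ((k : ℕ) : ℤ) ∧
          PySem.List.pyGetD a ((k : ℕ) : ℤ) 0 ≥ PySem.List.pyGetD a (((k : ℕ) : ℤ) - 1) 0
          then (if k = 0 then (0 : ℤ) else N a (k - 1)) + 1 else 1) = N a k := by
        rw [if_neg (by omega : ¬ k = 0)] at *
        by_cases hge : a.getD k 0 ≥ a.getD (k - 1) 0
        · rw [if_pos (hcond.mpr hge)]
          conv_rhs => rw [hk1]
          rw [N_succ]
          rw [← hk1, if_pos hge]
        · rw [if_neg (fun h => hge (hcond.mp h))]
          conv_rhs => rw [hk1]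
          rw [N_succ]
          rw [← hk1, if_neg hge]
      simp only [hrun, Finset.sum_range_succ]
      rw [if_neg (by omega : ¬ k + 1 = 0)]
      simp

-- exchanging the two orders of summation: counting by start index = counting by end index
lemma exchange (a : List Int) (m : ℕ) :
    ∑ i ∈ Finset.range m, ∑ j ∈ Finset.Ico i m, cIJ a i j = ∑ j ∈ Finset.range m, N a j := by
  calc ∑ i ∈ Finset.range m, ∑ j ∈ Finset.Ico i m, cIJ a i j
      = ∑ i ∈ Finset.range m, ∑ j ∈ Finset.range m, if i ≤ j then cIJ a i j else 0 := by
        apply Finset.sum_congr rfl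
        intro i _
        have h : Finset.Ico i m = (Finset.range m).filter (fun j => i ≤ j) := by
          ext x; simp [Finset.mem_Ico]; omega
        rw [h, Finset.sum_filter]
    _ = ∑ j ∈ Finset.range m, ∑ i ∈ Finset.range m, if i ≤ j then cIJ a i j else 0 :=
        Finset.sum_comm
    _ = ∑ j ∈ Finset.range m, N a j := by
        apply Finset.sum_congr rfl
        intro j hj
        have hj' := Finset.mem_range.mp hj
        have h : Finset.range (j + 1) = (Finset.range m).filter (fun i => i ≤ j) := by
          ext x; simp [Finset.mem_range]; omega
        rw [N, h, Finset.sum_filter]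

-- ===== VERDICT (by name: the statement is the Claim_ definition above) =====
theorem solve_n_2_time_spec : Claim_equal_solve_n_2_time := by
  intro a n _ _
  unfold Spec_solve_n_2_time
  have hR : PySem.List.pyRange 0 n 1 = (List.range n.toNat).map (Nat.cast : ℕ → ℤ) := by
    rw [PySem.List.pyRange_one]; simp
  simp only [solve_n_2_time, solve_n_2_time_alt, hR]
  have hd0 : Dims (((List.range n.toNat).map (Nat.cast : ℕ → ℤ)).map
      (fun _ => ((List.range n.toNat).map (Nat.cast : ℕ → ℤ)).map (fun _ => false)))
      n.toNat := by
    constructor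
    · simp
    · intro r hr
      simp only [List.mem_map] at hr
      obtain ⟨_, _, rfl⟩ := hr
      simp
  obtain ⟨h1, _⟩ := outer_total a n.toNat n.toNat le_rfl _ 0 hd0
  rw [h1, b_loop a n.toNat, zero_add, exchange]
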